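-- pv_equiv track=rewrite | github.com/lancegosu/leetcode | neetcode/ez/1768-MergeStringsAlternately.py | mergeAlternatelyReverse
-- ===== SOURCE A (Python) =====
-- def mergeAlternatelyReverse(word1: str, word2: str) -> str:
--     # define a variable that stores the output
--     merged_string = ""
--     # iterate through each word
--     for i in range(max(len(word1), len(word2))):
--         # store the char from each word to the merged_string
--         if i < len(word1):
--             merged_string += word1[i]
--         if i < len(word2):
--             pos = (len(word2) - 1) - i
--             merged_string += word2[pos]
--
--     return merged_string
-- ===== SOURCE B (Python) =====
-- def mergeAlternatelyReverse(word1: str, word2: str) -> str: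
--     rev = word2[::-1]
--     parts = [a + b for a, b in zip(word1, rev)]
--     if len(word1) > len(word2):
--         parts.append(word1[len(word2):])
--     else:
--         parts.append(rev[len(word1):])
--     return ''.join(parts)
-- ===== Notes on version B (the rewrite author's own statement) =====
-- stated objective: faster
-- what changed: Replaced the guarded index loop over range(max(len1,len2)) by zipping word1 with the reversed word2 for the shared prefix plus a single tail slice, joined once at the end.
import Mathlib
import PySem

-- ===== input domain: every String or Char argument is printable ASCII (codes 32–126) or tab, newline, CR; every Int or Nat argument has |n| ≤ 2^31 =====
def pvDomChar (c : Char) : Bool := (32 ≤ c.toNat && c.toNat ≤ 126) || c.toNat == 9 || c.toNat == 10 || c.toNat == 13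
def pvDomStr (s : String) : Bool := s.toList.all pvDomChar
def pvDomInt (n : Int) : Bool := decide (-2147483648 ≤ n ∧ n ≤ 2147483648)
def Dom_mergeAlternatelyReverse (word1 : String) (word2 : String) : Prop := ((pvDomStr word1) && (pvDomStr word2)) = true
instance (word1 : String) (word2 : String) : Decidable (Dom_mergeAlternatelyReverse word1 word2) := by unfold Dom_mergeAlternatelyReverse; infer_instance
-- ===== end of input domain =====

-- B replaces A's guarded per-index loop by zip(word1, reversed word2) plus one tail slice, joined once (measurably faster by constant factor).


-- ===== PORT A =====
-- merged_string is accumulated as a List Char (Python str built by +=); indexing word1[i]/word2[pos] is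
-- PySem.List.pyGetD on the char list — always in range because of the same guards A has.
def mergeAlternatelyReverse (word1 : String) (word2 : String) : String :=
  let n1 : Int := PySem.Str.len word1
  let n2 : Int := PySem.Str.len word2
  let merged : List Char :=
    (PySem.List.pyRange 0 (max n1 n2) 1).foldl (fun acc i =>
      let acc := if i < n1 then acc ++ [PySem.List.pyGetD word1.toList i ' '] else acc
      if i < n2 then acc ++ [PySem.List.pyGetD word2.toList ((n2 - 1) - i) ' '] else acc) []
  String.ofList merged

-- ===== PORT B =====
def mergeAlternatelyReverse_alt (word1 : String) (word2 : String) : String :=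
  let w1 := word1.toList
  let w2 := word2.toList
  let rev := w2.reverse                                   -- word2[::-1]
  let parts := (w1.zip rev).map (fun p => [p.1, p.2])     -- [a + b for a, b in zip(word1, rev)]
  let parts := parts ++
    [if w1.length > w2.length then w1.drop w2.length else rev.drop w1.length]
  String.ofList parts.flatten                                 -- ''.join(parts)

-- ===== PRECONDITION & SPEC =====
def Spec_mergeAlternatelyReverse (word1 : String) (word2 : String) (out : String) : Prop := out = mergeAlternatelyReverse_alt word1 word2
instance (word1 : String) (word2 : String) (out : String) : Decidable (Spec_mergeAlternatelyReverse word1 word2 out) := by unfold Spec_mergeAlternatelyReverse; infer_instance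

-- ===== CLAIM (what is proved, stated in full; the proofs are below) =====
def Claim_equal_mergeAlternatelyReverse : Prop := ∀ (word1 : String) (word2 : String), Dom_mergeAlternatelyReverse word1 word2 → Spec_mergeAlternatelyReverse word1 word2 (mergeAlternatelyReverse word1 word2)

-- ===== LEMMAS AND PROOFS =====

/-- The interleaving both programs compute. -/
def pvInterleave : List Char → List Char → List Char
  | [], r => r
  | xs, [] => xs
  | x :: xs, y :: r => x :: y :: pvInterleave xs r

/-- A's loop body on Nat indices over (word1.toList, word2.toList.reverse). -/
def pvStepN (xs r : List Char) (acc : List Char) (k : Nat) : List Char :=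
  let acc := if k < xs.length then acc ++ [xs.getD k ' '] else acc
  if k < r.length then acc ++ [r.getD k ' '] else acc

lemma pvStepN_shift (x y : Char) (xs r : List Char) :
    (fun (a : List Char) (k : Nat) => pvStepN (x :: xs) (y :: r) a (k + 1)) = pvStepN xs r := by
  funext a k
  simp [pvStepN]

lemma pvLoopN (xs r : List Char) (acc : List Char) :
    (List.range (max xs.length r.length)).foldl (pvStepN xs r) acc = acc ++ pvInterleave xs r := by
  induction xs generalizing r acc with
  | nil =>
    induction r generalizing acc with
    | nil => simp [pvInterleave]
    | cons y r ih =>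
      simp only [List.length_nil, List.length_cons, Nat.max_eq_right (Nat.zero_le _),
        List.range_succ_eq_map, List.foldl_cons, List.foldl_map]
      have h0 : pvStepN [] (y :: r) acc 0 = acc ++ [y] := by simp [pvStepN]
      have hsh : (fun (a : List Char) (k : Nat) => pvStepN [] (y :: r) a (k + 1)) = pvStepN [] r := by
        funext a k; simp [pvStepN]
      rw [h0, hsh]
      have := ih (acc ++ [y])
      simp only [List.length_nil, Nat.max_eq_right (Nat.zero_le _)] at this
      rw [this]
      simp [pvInterleave]
  | cons x xs ihx =>
    cases r with
    | nil =>
      simp only [List.length_cons, List.length_nil, Nat.max_eq_left (Nat.zero_le _),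
        List.range_succ_eq_map, List.foldl_cons, List.foldl_map]
      have h0 : pvStepN (x :: xs) [] acc 0 = acc ++ [x] := by simp [pvStepN]
      have hsh : (fun (a : List Char) (k : Nat) => pvStepN (x :: xs) [] a (k + 1)) = pvStepN xs [] := by
        funext a k; simp [pvStepN]
      rw [h0, hsh]
      have := ihx [] (acc ++ [x])
      simp only [List.length_nil, Nat.max_eq_left (Nat.zero_le _)] at this
      rw [this]
      cases xs <;> simp [pvInterleave]
    | cons y r =>
      simp only [List.length_cons, Nat.succ_max_succ, List.range_succ_eq_map,
        List.foldl_cons, List.foldl_map]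
      have h0 : pvStepN (x :: xs) (y :: r) acc 0 = acc ++ [x, y] := by simp [pvStepN]
      rw [h0, pvStepN_shift, ihx r (acc ++ [x, y])]
      simp [pvInterleave]

/-- A computes the interleaving. -/
lemma pvA_eq (word1 word2 : String) :
    mergeAlternatelyReverse word1 word2
      = String.ofList (pvInterleave word1.toList word2.toList.reverse) := by
  unfold mergeAlternatelyReverse
  set xs := word1.toList with hxs
  set ys := word2.toList with hys
  have hmax : ((max (PySem.Str.len word1) (PySem.Str.len word2)) - 0).toNat
      = max xs.length ys.reverse.length := by
    simp [PySem.Str.len_eq, ← hxs, ← hys]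
    omega
  simp only [PySem.List.pyRange_one, hmax, List.foldl_map]
  have hfun : (fun (acc : List Char) (k : Nat) =>
      (fun acc i =>
        let acc := if i < PySem.Str.len word1 then acc ++ [PySem.List.pyGetD word1.toList i ' '] else acc
        if i < PySem.Str.len word2 then acc ++ [PySem.List.pyGetD word2.toList ((PySem.Str.len word2 - 1) - i) ' '] else acc)
        acc ((0 : Int) + (k : Int)))
      = pvStepN xs ys.reverse := by
    funext acc k
    simp only [zero_add, pvStepN, PySem.Str.len_eq, ← hxs, ← hys]
    by_cases h1 : k < xs.length
    · by_cases h2 : k < ys.length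
      · have hidx : ((ys.length : Int) - 1 - (k : Int)) = ((ys.length - 1 - k : Nat) : Int) := by omega
        have hrev : PySem.List.pyGetD ys ((ys.length : Int) - 1 - (k : Int)) ' ' = ys.reverse.getD k ' ' := by
          rw [hidx, PySem.List.pyGetD_natCast]
          have hk : k < ys.reverse.length := by simpa using h2
          rw [List.getD_eq_getElem _ _ (by omega), List.getD_eq_getElem _ _ hk,
            List.getElem_reverse]
        simp [h1, h2, hrev, show ((k:Int) < (xs.length:Int)) from by exact_mod_cast h1,
          show ((k:Int) < (ys.length:Int)) from by exact_mod_cast h2]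
      · simp [h1, h2, show ((k:Int) < (xs.length:Int)) from by exact_mod_cast h1,
          show ¬((k:Int) < (ys.length:Int)) from by exact_mod_cast h2]
    · by_cases h2 : k < ys.length
      · have hidx : ((ys.length : Int) - 1 - (k : Int)) = ((ys.length - 1 - k : Nat) : Int) := by omega
        have hrev : PySem.List.pyGetD ys ((ys.length : Int) - 1 - (k : Int)) ' ' = ys.reverse.getD k ' ' := by
          rw [hidx, PySem.List.pyGetD_natCast]
          have hk : k < ys.reverse.length := by simpa using h2
          rw [List.getD_eq_getElem _ _ (by omega), List.getD_eq_getElem _ _ hk,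
            List.getElem_reverse]
        simp [h1, h2, hrev, show ¬((k:Int) < (xs.length:Int)) from by exact_mod_cast h1,
          show ((k:Int) < (ys.length:Int)) from by exact_mod_cast h2]
      · simp [h1, h2, show ¬((k:Int) < (xs.length:Int)) from by exact_mod_cast h1,
          show ¬((k:Int) < (ys.length:Int)) from by exact_mod_cast h2]
  rw [hfun, pvLoopN]
  simp

/-- B computes the interleaving. -/
lemma pvB_eq_core (xs r : List Char) :
    ((xs.zip r).map (fun p => [p.1, p.2]) ++
      [if xs.length > r.length then xs.drop r.length else r.drop xs.length]).flatten
      = pvInterleave xs r := by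
  induction xs generalizing r with
  | nil => cases r <;> simp [pvInterleave]
  | cons x xs ih =>
    cases r with
    | nil => simp [pvInterleave]
    | cons y r =>
      have := ih r
      simp only [List.zip_cons_cons, List.map_cons, List.cons_append, List.flatten_cons,
        pvInterleave, List.length_cons, List.drop_succ_cons, gt_iff_lt,
        Nat.add_lt_add_iff_right] at *
      rw [this]
      simp

lemma pvB_eq (word1 word2 : String) :
    mergeAlternatelyReverse_alt word1 word2
      = String.ofList (pvInterleave word1.toList word2.toList.reverse) := by
  unfold mergeAlternatelyReverse_alt
  have h := pvB_eq_core word1.toList word2.toList.reverse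
  simp only [List.length_reverse] at h ⊢
  rw [h]

-- ===== VERDICT (by name: the statement is the Claim_ definition above) =====
theorem mergeAlternatelyReverse_spec : Claim_equal_mergeAlternatelyReverse := by
  intro word1 word2 _
  unfold Spec_mergeAlternatelyReverse
  rw [pvA_eq, pvB_eq]
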